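-- pv_equiv track=rewrite | github.com/lam-valamorgulis/leetcode | DP/84.wiggleMaxLength.py | validPartition
-- ===== SOURCE A (Python) =====
-- from typing import List
--
-- def validPartition(nums: List[int]) -> bool:
--     n = len(nums)
--     # dp[i] represents whether the subarray nums[0:i+1] can be validly partitioned.
--     dp = [False] * (n + 1)
--     dp[0] = True  # Base case: an empty subarray can be considered valid
--
--     for i in range(1, n):
--         # Check if the last two elements form a valid subarray
--         if i >= 1 and nums[i] == nums[i - 1]:
--             dp[i + 1] = dp[i + 1] or dp[i - 1]
--
--         # Check if the last three elements form a valid subarray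
--         if i >= 2:
--             if nums[i] == nums[i - 1] == nums[i - 2]:
--                 dp[i + 1] = dp[i + 1] or dp[i - 2]
--             elif nums[i] == nums[i - 1] + 1 and nums[i -
--                                                      1] == nums[i - 2] + 1:
--                 dp[i + 1] = dp[i + 1] or dp[i - 2]
--
--     return dp[n]
-- ===== SOURCE B (Python) =====
-- from typing import List
--
-- def validPartition(nums: List[int]) -> bool:
--     # Graph reachability: cut positions 0..n are nodes, an edge i->i+2 for a valid
--     # pair and i->i+3 for a valid triple; DFS with an explicit stack and a visited
--     # set from 0, answering whether position n is reachable (early exit when popped).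
--     n = len(nums)
--     seen = {0}
--     stack = [0]
--     while stack:
--         i = stack.pop()
--         if i == n:
--             return True
--         if i + 2 <= n and nums[i] == nums[i + 1] and i + 2 not in seen:
--             seen.add(i + 2)
--             stack.append(i + 2)
--         if i + 3 <= n and (nums[i] == nums[i + 1] == nums[i + 2]
--                            or (nums[i + 1] == nums[i] + 1 and nums[i + 2] == nums[i + 1] + 1)) \
--                 and i + 3 not in seen:
--             seen.add(i + 3)
--             stack.append(i + 3)
--     return False
-- ===== Notes on version B (the rewrite author's own statement) =====
-- stated objective: alternative
-- what changed: Replaced A's bottom-up dp array over all prefixes with graph reachability: cut positions are nodes with edges i->i+2 (valid pair) and i->i+3 (valid triple), and a DFS with an explicit stack and a visited set asks whether position n is reachable from 0, visiting only reachable positions and exiting early.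
import Mathlib
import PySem

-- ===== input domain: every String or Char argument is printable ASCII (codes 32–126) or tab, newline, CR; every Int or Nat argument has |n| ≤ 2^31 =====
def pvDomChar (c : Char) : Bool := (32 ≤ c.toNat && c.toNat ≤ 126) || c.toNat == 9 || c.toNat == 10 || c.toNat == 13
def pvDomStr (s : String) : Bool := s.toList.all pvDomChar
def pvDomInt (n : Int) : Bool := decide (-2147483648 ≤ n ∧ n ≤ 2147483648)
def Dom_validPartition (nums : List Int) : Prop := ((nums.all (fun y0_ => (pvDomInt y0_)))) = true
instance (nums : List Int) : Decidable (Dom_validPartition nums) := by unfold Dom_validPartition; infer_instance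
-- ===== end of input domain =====

-- B replaces A's bottom-up dp array over prefixes with DFS graph reachability over cut positions (explicit stack + visited set, early exit): an alternative algorithm of the same cost.

-- ===== PORT A =====
-- Bottom-up dp over prefixes; dp is a List Bool of length n+1, the loop a foldl over range(1, n)
-- (List.range' 1 (n-1)), with the loop body named stepA. nums.getD i 0 is exact for nums[i]: every
-- index the loop reads is in range on every iteration.
def stepA (nums : List Int) (dp : List Bool) (i : Nat) : List Bool :=
  let dp := if decide (1 ≤ i) && (nums.getD i 0 == nums.getD (i - 1) 0) then
      dp.set (i + 1) (dp.getD (i + 1) false || dp.getD (i - 1) false) else dp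
  if 2 ≤ i then
    if nums.getD i 0 == nums.getD (i - 1) 0 && nums.getD (i - 1) 0 == nums.getD (i - 2) 0 then
      dp.set (i + 1) (dp.getD (i + 1) false || dp.getD (i - 2) false)
    else if nums.getD i 0 == nums.getD (i - 1) 0 + 1 && nums.getD (i - 1) 0 == nums.getD (i - 2) 0 + 1 then
      dp.set (i + 1) (dp.getD (i + 1) false || dp.getD (i - 2) false)
    else dp
  else dp

def validPartition (nums : List Int) : Bool :=
  let n := nums.length
  let dp : List Bool := List.replicate (n + 1) false
  let dp := dp.set 0 true
  let dp := (List.range' 1 (n - 1)).foldl (stepA nums) dp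
  dp.getD n false

-- ===== PORT B =====
-- DFS reachability over cut positions 0..n. edge2/edge3 are the pair/triple edge tests of Source B
-- (nums.getD j 0 is exact for nums[j]: every read is guarded by the i+2 ≤ n / i+3 ≤ n bound check).
def edge2 (nums : List Int) (i : Nat) : Bool :=
  decide (i + 2 ≤ nums.length) && (nums.getD i 0 == nums.getD (i + 1) 0)

def edge3 (nums : List Int) (i : Nat) : Bool :=
  decide (i + 3 ≤ nums.length) &&
    ((nums.getD i 0 == nums.getD (i + 1) 0 && nums.getD (i + 1) 0 == nums.getD (i + 2) 0) ||
     (nums.getD (i + 1) 0 == nums.getD i 0 + 1 && nums.getD (i + 2) 0 == nums.getD (i + 1) 0 + 1))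

-- The while loop of Source B: pop i from the stack; return True on i = n; otherwise the two
-- membership-guarded pushes (seen.add + stack.append), in Source B's order, then loop. The fuel
-- parameter only makes the recursion total (structural); 2*n+1 units never run out, because
-- every pushed position is fresh and ≤ n (proved in dfsLoop_iff below).
def dfsLoop (nums : List Int) (fuel : Nat) (seen : List Nat) (stack : List Nat) : Bool :=
  match fuel with
  | 0 => false
  | fuel + 1 =>
    match stack with
    | [] => false
    | i :: rest =>
      if i = nums.length then true
      else
        if edge2 nums i = true ∧ (i + 2) ∉ seen then
          if edge3 nums i = true ∧ (i + 3) ∉ seen ++ [i + 2] then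
            dfsLoop nums fuel (seen ++ [i + 2] ++ [i + 3]) ((i + 3) :: (i + 2) :: rest)
          else
            dfsLoop nums fuel (seen ++ [i + 2]) ((i + 2) :: rest)
        else
          if edge3 nums i = true ∧ (i + 3) ∉ seen then
            dfsLoop nums fuel (seen ++ [i + 3]) ((i + 3) :: rest)
          else
            dfsLoop nums fuel seen rest

def validPartition_alt (nums : List Int) : Bool :=
  dfsLoop nums (2 * nums.length + 1) [0] [0]

-- ===== PRECONDITION & SPEC =====
def Spec_validPartition (nums : List Int) (out : Bool) : Prop := out = validPartition_alt nums
instance (nums : List Int) (out : Bool) : Decidable (Spec_validPartition nums out) := by unfold Spec_validPartition; infer_instance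

-- ===== CLAIM (what is proved, stated in full; the proofs are below) =====
def Claim_equal_validPartition : Prop := ∀ (nums : List Int), Dom_validPartition nums → Spec_validPartition nums (validPartition nums)

-- ===== LEMMAS AND PROOFS =====

theorem nodup_snoc (l : List Nat) (x : Nat) (h : l.Nodup) (hx : x ∉ l) :
    (l ++ [x]).Nodup := by
  simp only [List.nodup_append, List.nodup_cons, List.not_mem_nil, not_false_iff,
    List.nodup_nil, and_true, true_and]
  refine ⟨h, ?_⟩
  intro a ha b hb
  simp only [List.mem_cons, List.not_mem_nil, or_false] at hb
  subst hb
  intro h'; exact hx (h' ▸ ha)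

theorem le_snoc (n : Nat) (l : List Nat) (x : Nat) (h : ∀ y ∈ l, y ≤ n) (hx : x ≤ n) :
    ∀ y ∈ l ++ [x], y ≤ n := by
  intro y hy
  rcases List.mem_append.mp hy with h' | h'
  · exact h y h'
  · simp at h'; omega

theorem edge2_le (nums : List Int) (i : Nat) (h : edge2 nums i = true) :
    i + 2 ≤ nums.length := by
  unfold edge2 at h; simp only [Bool.and_eq_true, decide_eq_true_eq] at h; exact h.1

theorem edge3_le (nums : List Int) (i : Nat) (h : edge3 nums i = true) :
    i + 3 ≤ nums.length := by
  unfold edge3 at h; simp only [Bool.and_eq_true, decide_eq_true_eq] at h; exact h.1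

theorem nodup_bounded_length (n : Nat) (l : List Nat) (hnd : l.Nodup)
    (hle : ∀ x ∈ l, x ≤ n) : l.length ≤ n + 1 := by
  have hsub : l ⊆ List.range (n + 1) := by
    intro x hx; exact List.mem_range.mpr (by have := hle x hx; omega)
  simpa using (hnd.subperm hsub).length_le


-- "l can be partitioned into contiguous blocks of two equal, three equal, or three consecutive elements"
inductive CanPart : List Int → Prop
  | nil : CanPart []
  | pair (a b : Int) (l : List Int) : a = b → CanPart l → CanPart (a :: b :: l)
  | tripEq (a b c : Int) (l : List Int) : a = b → b = c → CanPart l → CanPart (a :: b :: c :: l)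
  | tripInc (a b c : Int) (l : List Int) : b = a + 1 → c = b + 1 → CanPart l → CanPart (a :: b :: c :: l)

theorem canPart_not_singleton (a : Int) : ¬ CanPart [a] := by
  intro h; cases h

theorem canPart_cons_cons_iff (a b : Int) (l : List Int) :
    CanPart (a :: b :: l) ↔
      (a = b ∧ CanPart l) ∨
      (∃ c l', l = c :: l' ∧ ((a = b ∧ b = c) ∨ (b = a + 1 ∧ c = b + 1)) ∧ CanPart l') := by
  constructor
  · intro h
    cases h with
    | pair _ _ _ hab h => exact Or.inl ⟨hab, h⟩
    | tripEq _ _ c l' hab hbc h => exact Or.inr ⟨c, l', rfl, Or.inl ⟨hab, hbc⟩, h⟩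
    | tripInc _ _ c l' hb hc h => exact Or.inr ⟨c, l', rfl, Or.inr ⟨hb, hc⟩, h⟩
  · rintro (⟨hab, h⟩ | ⟨c, l', rfl, (⟨hab, hbc⟩ | ⟨hb, hc⟩), h⟩)
    · exact CanPart.pair _ _ _ hab h
    · exact CanPart.tripEq _ _ _ _ hab hbc h
    · exact CanPart.tripInc _ _ _ _ hb hc h

-- proof-side helper: sufB nums i = "nums[i:] can be validly partitioned", recursion on the suffix
def sufB (nums : List Int) (i : Nat) : Bool :=
  if i = nums.length then true
  else
    (if _h2 : i + 2 ≤ nums.length then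
       (nums.getD i 0 == nums.getD (i + 1) 0) && sufB nums (i + 2)
     else false) ||
    (if _h3 : i + 3 ≤ nums.length then
       ((nums.getD i 0 == nums.getD (i + 1) 0 && nums.getD (i + 1) 0 == nums.getD (i + 2) 0) ||
        (nums.getD (i + 1) 0 == nums.getD i 0 + 1 && nums.getD (i + 2) 0 == nums.getD (i + 1) 0 + 1)) &&
       sufB nums (i + 3)
     else false)
termination_by nums.length - i
decreasing_by all_goals omega

theorem getD_at (nums : List Int) (j : Nat) (h : j < nums.length) :
    nums.getD j 0 = nums[j] := by
  simp [List.getD_eq_getElem?_getD, List.getElem?_eq_getElem h]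

theorem sufB_iff (nums : List Int) : ∀ (k i : Nat), nums.length - i = k → i ≤ nums.length →
    (sufB nums i = true ↔ CanPart (nums.drop i)) := by
  intro k
  induction k using Nat.strong_induction_on with
  | _ k IH =>
    intro i hk hi
    rw [sufB]
    by_cases h : i = nums.length
    · simp only [h, List.drop_length]
      exact ⟨fun _ => CanPart.nil, fun _ => rfl⟩
    · have hlt : i < nums.length := lt_of_le_of_ne hi h
      rw [if_neg h]
      have hd0 : nums.drop i = nums[i] :: nums.drop (i + 1) := List.drop_eq_getElem_cons hlt
      by_cases h2 : i + 2 ≤ nums.length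
      · have hlt1 : i + 1 < nums.length := by omega
        have hd1 : nums.drop (i + 1) = nums[i+1] :: nums.drop (i + 2) := List.drop_eq_getElem_cons hlt1
        have hB2 := IH (nums.length - (i+2)) (by omega) (i+2) rfl (by omega)
        rw [dif_pos h2, getD_at nums i hlt, getD_at nums (i+1) hlt1]
        by_cases h3 : i + 3 ≤ nums.length
        · have hlt2 : i + 2 < nums.length := by omega
          have hd2 : nums.drop (i + 2) = nums[i+2] :: nums.drop (i + 3) := List.drop_eq_getElem_cons hlt2
          have hB3 := IH (nums.length - (i+3)) (by omega) (i+3) rfl (by omega)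
          rw [dif_pos h3, getD_at nums (i+2) hlt2]
          rw [hd0, hd1, canPart_cons_cons_iff]
          simp only [Bool.or_eq_true, Bool.and_eq_true, beq_iff_eq, hB2, hB3, hd2]
          constructor
          · rintro (⟨hab, hc⟩ | ⟨hcond, hc⟩)
            · exact Or.inl ⟨hab, hd2 ▸ hc⟩
            · refine Or.inr ⟨nums[i+2], nums.drop (i+3), rfl, ?_, hc⟩
              rcases hcond with ⟨hab, hbc⟩ | ⟨hb, hcc⟩
              · exact Or.inl ⟨hab, hbc⟩
              · exact Or.inr ⟨hb, hcc⟩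
          · rintro (⟨hab, hc⟩ | ⟨c, l', heq, hcond, hc⟩)
            · exact Or.inl ⟨hab, hd2 ▸ hc⟩
            · injection heq with e1 e2
              subst e1; subst e2
              exact Or.inr ⟨hcond, hc⟩
        · have h2e : i + 2 = nums.length := by omega
          have hd2 : nums.drop (i + 2) = [] := by rw [h2e, List.drop_length]
          rw [dif_neg h3]
          rw [hd0, hd1, hd2, canPart_cons_cons_iff]
          simp only [Bool.and_eq_true, beq_iff_eq, hB2, hd2, Bool.or_false]
          constructor
          · rintro ⟨hab, _⟩
            exact Or.inl ⟨hab, CanPart.nil⟩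
          · rintro (⟨hab, _⟩ | ⟨c, l', heq, _, _⟩)
            · exact ⟨hab, CanPart.nil⟩
            · simp at heq
      · have h1e : i + 1 = nums.length := by omega
        have h3 : ¬ i + 3 ≤ nums.length := by omega
        rw [dif_neg h2, dif_neg h3]
        have hd1 : nums.drop (i + 1) = [] := by rw [h1e, List.drop_length]
        rw [hd0, hd1]
        simp only [Bool.or_self]
        constructor
        · intro hfalse; cases hfalse
        · intro hc; exact absurd hc (canPart_not_singleton _)

theorem canPart_append_pair (t : List Int) (a b : Int) (hab : a = b) (ht : CanPart t) :
    CanPart (t ++ [a, b]) := by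
  induction ht with
  | nil => exact CanPart.pair _ _ _ hab CanPart.nil
  | pair x y l hxy _ IH => exact CanPart.pair _ _ _ hxy IH
  | tripEq x y z l h1 h2 _ IH => exact CanPart.tripEq _ _ _ _ h1 h2 IH
  | tripInc x y z l h1 h2 _ IH => exact CanPart.tripInc _ _ _ _ h1 h2 IH

theorem canPart_append_trip (t : List Int) (a b c : Int)
    (hc : (a = b ∧ b = c) ∨ (b = a + 1 ∧ c = b + 1)) (ht : CanPart t) :
    CanPart (t ++ [a, b, c]) := by
  induction ht with
  | nil =>
    rcases hc with ⟨h1, h2⟩ | ⟨h1, h2⟩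
    · exact CanPart.tripEq _ _ _ _ h1 h2 CanPart.nil
    · exact CanPart.tripInc _ _ _ _ h1 h2 CanPart.nil
  | pair x y l hxy _ IH => exact CanPart.pair _ _ _ hxy IH
  | tripEq x y z l h1 h2 _ IH => exact CanPart.tripEq _ _ _ _ h1 h2 IH
  | tripInc x y z l h1 h2 _ IH => exact CanPart.tripInc _ _ _ _ h1 h2 IH

theorem canPart_last_block {l : List Int} (h : CanPart l) :
    l = [] ∨
    (∃ t a b, l = t ++ [a, b] ∧ a = b ∧ CanPart t) ∨
    (∃ t a b c, l = t ++ [a, b, c] ∧ ((a = b ∧ b = c) ∨ (b = a + 1 ∧ c = b + 1)) ∧ CanPart t) := by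
  induction h with
  | nil => exact Or.inl rfl
  | pair a b l hab hl IH =>
    rcases IH with rfl | ⟨t, x, y, rfl, hxy, ht⟩ | ⟨t, x, y, z, rfl, hc, ht⟩
    · exact Or.inr (Or.inl ⟨[], a, b, rfl, hab, CanPart.nil⟩)
    · exact Or.inr (Or.inl ⟨a :: b :: t, x, y, rfl, hxy, CanPart.pair _ _ _ hab ht⟩)
    · exact Or.inr (Or.inr ⟨a :: b :: t, x, y, z, rfl, hc, CanPart.pair _ _ _ hab ht⟩)
  | tripEq a b c l h1 h2 hl IH =>
    rcases IH with rfl | ⟨t, x, y, rfl, hxy, ht⟩ | ⟨t, x, y, z, rfl, hc, ht⟩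
    · exact Or.inr (Or.inr ⟨[], a, b, c, rfl, Or.inl ⟨h1, h2⟩, CanPart.nil⟩)
    · exact Or.inr (Or.inl ⟨a :: b :: c :: t, x, y, rfl, hxy, CanPart.tripEq _ _ _ _ h1 h2 ht⟩)
    · exact Or.inr (Or.inr ⟨a :: b :: c :: t, x, y, z, rfl, hc, CanPart.tripEq _ _ _ _ h1 h2 ht⟩)
  | tripInc a b c l h1 h2 hl IH =>
    rcases IH with rfl | ⟨t, x, y, rfl, hxy, ht⟩ | ⟨t, x, y, z, rfl, hc, ht⟩
    · exact Or.inr (Or.inr ⟨[], a, b, c, rfl, Or.inr ⟨h1, h2⟩, CanPart.nil⟩)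
    · exact Or.inr (Or.inl ⟨a :: b :: c :: t, x, y, rfl, hxy, CanPart.tripInc _ _ _ _ h1 h2 ht⟩)
    · exact Or.inr (Or.inr ⟨a :: b :: c :: t, x, y, z, rfl, hc, CanPart.tripInc _ _ _ _ h1 h2 ht⟩)

theorem canPart_two_iff (a b : Int) : CanPart [a, b] ↔ a = b := by
  constructor
  · intro h; cases h with | pair _ _ _ hab _ => exact hab
  · intro hab; exact CanPart.pair _ _ _ hab CanPart.nil

theorem canPart_snoc3_iff (t : List Int) (a b c : Int) :
    CanPart (t ++ [a, b, c]) ↔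
      (b = c ∧ CanPart (t ++ [a])) ∨
      (((a = b ∧ b = c) ∨ (b = a + 1 ∧ c = b + 1)) ∧ CanPart t) := by
  constructor
  · intro h
    rcases canPart_last_block h with hnil | ⟨t', x, y, heq, hxy, ht'⟩ | ⟨t', x, y, z, heq, hc, ht'⟩
    · simp at hnil
    · have heq' : (t ++ [a]) ++ [b, c] = t' ++ [x, y] := by
        rw [List.append_assoc]; exact heq
      obtain ⟨h1, h2⟩ := List.append_inj' heq' rfl
      injection h2 with e1 h2; injection h2 with e2 _
      subst e1; subst e2
      exact Or.inl ⟨hxy, h1 ▸ ht'⟩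
    · obtain ⟨h1, h2⟩ := List.append_inj' heq rfl
      injection h2 with e1 h2; injection h2 with e2 h2; injection h2 with e3 _
      subst e1; subst e2; subst e3
      exact Or.inr ⟨hc, h1 ▸ ht'⟩
  · rintro (⟨hbc, ht⟩ | ⟨hc, ht⟩)
    · have := canPart_append_pair (t ++ [a]) b c hbc ht
      simpa [List.append_assoc] using this
    · exact canPart_append_trip t a b c hc ht

theorem getD_set_self (l : List Bool) (i : Nat) (a : Bool) (h : i < l.length) :
    (l.set i a).getD i false = a := by
  simp [List.getD_eq_getElem?_getD, h]
theorem getD_set_ne (l : List Bool) (i j : Nat) (a : Bool) (h : i ≠ j) :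
    (l.set i a).getD j false = l.getD j false := by
  simp [List.getD_eq_getElem?_getD, List.getElem?_set_ne h]
theorem getD_replicate (m k : Nat) : (List.replicate m false).getD k false = false := by
  simp [List.getD_eq_getElem?_getD]
theorem take_succ_at (nums : List Int) (j : Nat) (h : j < nums.length) :
    nums.take (j + 1) = nums.take j ++ [nums[j]] := by
  rw [List.take_add_one]; simp [List.getElem?_eq_getElem h]

theorem stepA_length (nums : List Int) (dp : List Bool) (i : Nat) :
    (stepA nums dp i).length = dp.length := by
  unfold stepA; split_ifs <;> simp

theorem stepA_getD (nums : List Int) (dp : List Bool) (i k : Nat) (hlen : i + 1 < dp.length) :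
    (stepA nums dp i).getD k false =
      if k = i + 1 then
        dp.getD (i + 1) false
        || ((decide (1 ≤ i) && (nums.getD i 0 == nums.getD (i - 1) 0)) && dp.getD (i - 1) false)
        || (decide (2 ≤ i) &&
            ((nums.getD i 0 == nums.getD (i - 1) 0 && nums.getD (i - 1) 0 == nums.getD (i - 2) 0) ||
             (nums.getD i 0 == nums.getD (i - 1) 0 + 1 && nums.getD (i - 1) 0 == nums.getD (i - 2) 0 + 1)) &&
            dp.getD (i - 2) false)
      else dp.getD k false := by
  have hne1 : i + 1 ≠ i - 1 := by omega
  have hne2 : i + 1 ≠ i - 2 := by omega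
  unfold stepA
  by_cases hk : k = i + 1
  · subst hk
    split_ifs with hp h2 hte hti <;>
      simp_all [getD_set_self, getD_set_ne, List.length_set, hlen,
        getD_set_ne _ (i+1) (i-1) _ hne1, getD_set_ne _ (i+1) (i-2) _ hne2] <;>
      cases hdp : dp.getD (i+1) false <;> simp_all [Bool.or_assoc, Bool.or_comm, Bool.or_left_comm]
  · have hne : i + 1 ≠ k := fun h => hk h.symm
    split_ifs <;> simp [List.getD_eq_getElem?_getD, List.getElem?_set_ne hne, hk]

def InvA (nums : List Int) (f : Nat) (dp : List Bool) : Prop :=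
  dp.length = nums.length + 1 ∧
  ∀ k, (dp.getD k false = true ↔ (k ≤ f ∧ CanPart (nums.take k)))

theorem invA_init (nums : List Int) (hn : 1 ≤ nums.length) :
    InvA nums 1 ((List.replicate (nums.length + 1) false).set 0 true) := by
  refine ⟨by simp, fun k => ?_⟩
  match k with
  | 0 =>
    rw [getD_set_self _ _ _ (by simp)]
    simpa using CanPart.nil
  | (k + 1) =>
    rw [getD_set_ne _ _ _ _ (by omega), getD_replicate]
    simp only [Bool.false_eq_true, false_iff]
    rintro ⟨hk1, hc⟩
    have hk0 : k = 0 := by omega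
    subst hk0
    rw [take_succ_at nums 0 (by omega)] at hc
    simp only [List.take_zero, List.nil_append] at hc
    exact canPart_not_singleton _ hc

theorem stepA_inv (nums : List Int) (i : Nat) (dp : List Bool) (h1 : 1 ≤ i)
    (h2 : i + 1 ≤ nums.length) (hInv : InvA nums i dp) : InvA nums (i + 1) (stepA nums dp i) := by
  obtain ⟨hlen, hval⟩ := hInv
  refine ⟨by rw [stepA_length, hlen], fun k => ?_⟩
  rw [stepA_getD nums dp i k (by omega)]
  by_cases hk : k = i + 1
  · subst hk
    rw [if_pos rfl]
    have hfalse : dp.getD (i + 1) false = false := by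
      cases hdp : dp.getD (i + 1) false
      · rfl
      · exact absurd ((hval (i + 1)).1 hdp).1 (by omega)
    rcases Nat.lt_or_ge i 2 with hcase | hcase
    · obtain rfl : i = 1 := by omega
      have hd1 : dp.getD 0 false = true ↔ CanPart (nums.take 0) := by
        rw [hval 0]
        exact ⟨fun ⟨_, h⟩ => h, fun h => ⟨by omega, h⟩⟩
      rw [hfalse]
      rw [take_succ_at nums 1 (by omega), take_succ_at nums 0 (by omega)]
      rw [getD_at nums 1 (by omega), getD_at nums 0 (by omega)]
      simp only [List.take_zero, List.nil_append, List.singleton_append]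
      rw [canPart_two_iff]
      simp only [Bool.false_or, Bool.or_eq_true, Bool.and_eq_true, beq_iff_eq,
        decide_eq_true_eq]
      constructor
      · rintro (⟨⟨_, hab⟩, _⟩ | ⟨⟨h21, _⟩, _⟩)
        · exact ⟨le_refl _, hab.symm⟩
        · omega
      · rintro ⟨_, hab⟩
        exact Or.inl ⟨⟨le_refl _, hab.symm⟩, hd1.2 (by simpa using CanPart.nil)⟩
    · obtain ⟨j, rfl⟩ : ∃ j, i = j + 2 := ⟨i - 2, by omega⟩
      have e1 : j + 2 - 1 = j + 1 := rfl
      have e2 : j + 2 - 2 = j := rfl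
      have hd1 : dp.getD (j + 1) false = true ↔ CanPart (nums.take (j + 1)) := by
        rw [hval (j + 1)]
        exact ⟨fun ⟨_, h⟩ => h, fun h => ⟨by omega, h⟩⟩
      have hd2 : dp.getD j false = true ↔ CanPart (nums.take j) := by
        rw [hval j]
        exact ⟨fun ⟨_, h⟩ => h, fun h => ⟨by omega, h⟩⟩
      rw [hfalse]
      simp only [e1, e2]
      rw [getD_at nums (j + 2) (by omega), getD_at nums (j + 1) (by omega),
          getD_at nums j (by omega)]
      rw [take_succ_at nums (j + 2) (by omega), take_succ_at nums (j + 1) (by omega),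
          take_succ_at nums j (by omega)]
      rw [List.append_assoc, List.append_assoc]
      simp only [List.singleton_append, List.cons_append, List.nil_append]
      rw [canPart_snoc3_iff]
      have htk : nums.take j ++ [nums[j]] = nums.take (j + 1) := (take_succ_at nums j (by omega)).symm
      rw [htk]
      simp only [Bool.false_or, Bool.or_eq_true, Bool.and_eq_true, beq_iff_eq,
        decide_eq_true_eq, hd1, hd2]
      constructor
      · rintro (⟨⟨_, hab⟩, hc⟩ | ⟨⟨_, hcond⟩, hc⟩)
        · exact ⟨le_refl _, Or.inl ⟨hab.symm, hc⟩⟩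
        · refine ⟨le_refl _, Or.inr ⟨?_, hc⟩⟩
          rcases hcond with ⟨x, y⟩ | ⟨x, y⟩
          · exact Or.inl ⟨y.symm, x.symm⟩
          · exact Or.inr ⟨y, x⟩
      · rintro ⟨_, (⟨hbc, hc⟩ | ⟨hcond, hc⟩)⟩
        · exact Or.inl ⟨⟨by omega, hbc.symm⟩, hc⟩
        · refine Or.inr ⟨⟨by omega, ?_⟩, hc⟩
          rcases hcond with ⟨x, y⟩ | ⟨x, y⟩
          · exact Or.inl ⟨y.symm, x.symm⟩
          · exact Or.inr ⟨y, x⟩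
  · rw [if_neg hk, hval k]
    constructor
    · rintro ⟨h, hc⟩; exact ⟨by omega, hc⟩
    · rintro ⟨h, hc⟩; exact ⟨by omega, hc⟩

theorem foldl_invA (nums : List Int) (hn : 1 ≤ nums.length) :
    ∀ m, m + 1 ≤ nums.length →
      InvA nums (m + 1) ((List.range' 1 m).foldl (stepA nums)
        ((List.replicate (nums.length + 1) false).set 0 true)) := by
  intro m
  induction m with
  | zero => intro _; simpa using invA_init nums hn
  | succ m IH =>
    intro h
    rw [List.range'_concat, List.foldl_append]
    simp only [List.foldl_cons, List.foldl_nil]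
    have := stepA_inv nums (m + 1) _ (by omega) (by omega) (IH (by omega))
    simpa [Nat.add_comm 1 m] using this

theorem validPartition_iff (nums : List Int) :
    validPartition nums = true ↔ CanPart nums := by
  rcases Nat.eq_zero_or_pos nums.length with hn | hn
  · rw [List.length_eq_zero_iff] at hn
    subst hn
    exact ⟨fun _ => CanPart.nil, fun _ => by decide⟩
  · obtain ⟨hlen, hval⟩ := foldl_invA nums hn (nums.length - 1) (by omega)
    have hm : nums.length - 1 + 1 = nums.length := by omega
    rw [hm] at hval
    unfold validPartition
    simp only []
    rw [hval nums.length, List.take_length]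
    constructor
    · rintro ⟨_, hc⟩; exact hc
    · intro hc; exact ⟨le_refl _, hc⟩

-- ===== B-side: DFS correctness =====

-- the edge relation of B's graph, and "position n is reachable from i"
def IsEdge (nums : List Int) (i j : Nat) : Prop :=
  (edge2 nums i = true ∧ j = i + 2) ∨ (edge3 nums i = true ∧ j = i + 3)

inductive ReachTo (nums : List Int) : Nat → Prop
  | base : ReachTo nums nums.length
  | step (i j : Nat) : IsEdge nums i j → ReachTo nums j → ReachTo nums i

theorem reachTo_iff_sufB (nums : List Int) : ∀ (k i : Nat), nums.length - i = k →
    i ≤ nums.length → (ReachTo nums i ↔ sufB nums i = true) := by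
  intro k
  induction k using Nat.strong_induction_on with
  | _ k IH =>
    intro i hk hi
    rw [sufB]
    by_cases h : i = nums.length
    · rw [if_pos h]
      exact iff_of_true (h ▸ ReachTo.base) rfl
    · rw [if_neg h]
      have hlt : i < nums.length := lt_of_le_of_ne hi h
      constructor
      · intro hr
        cases hr with
        | base => exact absurd rfl h
        | step i j he hr =>
          rcases he with ⟨he2, rfl⟩ | ⟨he3, rfl⟩
          · have hb : i + 2 ≤ nums.length := by
              unfold edge2 at he2; simp at he2; omega
            have := (IH (nums.length - (i + 2)) (by omega) (i + 2) rfl (by omega)).1 hr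
            rw [dif_pos hb, Bool.or_eq_true]
            left
            unfold edge2 at he2
            simp only [Bool.and_eq_true, decide_eq_true_eq] at he2
            rw [Bool.and_eq_true]
            exact ⟨he2.2, this⟩
          · have hb : i + 3 ≤ nums.length := by
              unfold edge3 at he3; simp at he3; omega
            have := (IH (nums.length - (i + 3)) (by omega) (i + 3) rfl (by omega)).1 hr
            rw [dif_pos hb, Bool.or_eq_true]
            right
            unfold edge3 at he3
            simp only [Bool.and_eq_true, decide_eq_true_eq] at he3
            rw [Bool.and_eq_true]
            exact ⟨he3.2, this⟩
      · intro hs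
        rw [Bool.or_eq_true] at hs
        rcases hs with hs | hs
        · by_cases hb : i + 2 ≤ nums.length
          · rw [dif_pos hb, Bool.and_eq_true] at hs
            have hr := (IH (nums.length - (i + 2)) (by omega) (i + 2) rfl (by omega)).2 hs.2
            refine ReachTo.step i (i + 2) (Or.inl ⟨?_, rfl⟩) hr
            unfold edge2; rw [Bool.and_eq_true]; exact ⟨decide_eq_true hb, hs.1⟩
          · rw [dif_neg hb] at hs; cases hs
        · by_cases hb : i + 3 ≤ nums.length
          · rw [dif_pos hb, Bool.and_eq_true] at hs
            have hr := (IH (nums.length - (i + 3)) (by omega) (i + 3) rfl (by omega)).2 hs.2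
            refine ReachTo.step i (i + 3) (Or.inr ⟨?_, rfl⟩) hr
            unfold edge3; rw [Bool.and_eq_true]; exact ⟨decide_eq_true hb, hs.1⟩
          · rw [dif_neg hb] at hs; cases hs

-- loop invariant: stack ⊆ seen, and every already-expanded position (in seen but not on the
-- stack) is ≠ n and has all its successors in seen; then the loop answers exactly
-- "some seen position reaches n".
theorem seen_no_reach (nums : List Int) (seen : List Nat)
    (hcl : ∀ x ∈ seen, x ≠ nums.length ∧ ∀ j, IsEdge nums x j → j ∈ seen) :
    ¬ ∃ x ∈ seen, ReachTo nums x := by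
  rintro ⟨x, hx, hr⟩
  induction hr with
  | base => exact absurd rfl ((hcl _ hx).1)
  | step i j he hr IHr =>
    exact IHr ((hcl _ hx).2 j he)

theorem dfsLoop_iff (nums : List Int) : ∀ (fuel : Nat) (seen stack : List Nat),
    seen.Nodup → (∀ x ∈ seen, x ≤ nums.length) →
    2 * (nums.length + 1 - seen.length) + stack.length ≤ fuel →
    (∀ x ∈ stack, x ∈ seen) →
    (∀ x ∈ seen, x ∉ stack → x ≠ nums.length ∧ ∀ j, IsEdge nums x j → j ∈ seen) →
    (dfsLoop nums fuel seen stack = true ↔ ∃ x ∈ seen, ReachTo nums x) := by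
  intro fuel
  induction fuel with
  | zero =>
    intro seen stack hnd hle hm hsub hcl
    have hstack : stack = [] := by
      cases stack with
      | nil => rfl
      | cons a l => simp [List.length_cons] at hm
    subst hstack
    rw [dfsLoop]
    simp only [Bool.false_eq_true, false_iff]
    exact seen_no_reach nums seen (fun x hx => hcl x hx (by simp))
  | succ fuel IH =>
    intro seen stack hnd hle hm hsub hcl
    cases stack with
    | nil =>
      rw [dfsLoop]
      simp only [Bool.false_eq_true, false_iff]
      exact seen_no_reach nums seen (fun x hx => hcl x hx (by simp))
    | cons i rest =>
      rw [dfsLoop]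
      by_cases hi : i = nums.length
      · rw [if_pos hi]
        exact iff_of_true rfl ⟨i, hsub i (by simp), hi ▸ ReachTo.base⟩
      · rw [if_neg hi]
        by_cases h2 : edge2 nums i = true ∧ (i + 2) ∉ seen
        · rw [if_pos h2]
          by_cases h3 : edge3 nums i = true ∧ (i + 3) ∉ seen ++ [i + 2]
          · -- both pushes
            rw [if_pos h3]
            have hlen : (seen ++ [i + 2] ++ [i + 3]).length ≤ nums.length + 1 :=
              nodup_bounded_length nums.length _
                (nodup_snoc _ _ (nodup_snoc _ _ hnd h2.2) h3.2)
                (le_snoc _ _ _ (le_snoc _ _ _ hle (edge2_le _ _ h2.1)) (edge3_le _ _ h3.1))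
            have h3' : (i + 3) ∉ seen ∧ i + 3 ≠ i + 2 := by
              constructor <;> intro h' <;> exact h3.2 (by simp [h'])
            rw [IH (seen ++ [i + 2] ++ [i + 3]) ((i + 3) :: (i + 2) :: rest)
                (nodup_snoc _ _ (nodup_snoc _ _ hnd h2.2) h3.2)
                (le_snoc _ _ _ (le_snoc _ _ _ hle (edge2_le _ _ h2.1)) (edge3_le _ _ h3.1))
                (by simp only [List.length_append, List.length_cons] at *; omega) ?_ ?_]
            · constructor
              · rintro ⟨x, hx, hr⟩
                simp only [List.append_assoc, List.mem_append, List.mem_cons,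
                  List.not_mem_nil, or_false] at hx
                rcases hx with hx | hx | hx
                · exact ⟨x, hx, hr⟩
                · subst hx
                  exact ⟨i, hsub i (by simp), ReachTo.step i (i + 2) (Or.inl ⟨h2.1, rfl⟩) hr⟩
                · subst hx
                  exact ⟨i, hsub i (by simp), ReachTo.step i (i + 3) (Or.inr ⟨h3.1, rfl⟩) hr⟩
              · rintro ⟨x, hx, hr⟩
                exact ⟨x, by simp [hx], hr⟩
            · intro x hx
              simp only [List.mem_cons] at hx
              rcases hx with hx | hx | hx
              · subst hx; simp
              · subst hx; simp
              · have := hsub x (by simp [hx]); simp [this]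
            · intro x hx hxs
              simp only [List.append_assoc, List.mem_append, List.mem_cons,
                List.not_mem_nil, or_false] at hx
              simp only [List.mem_cons, not_or] at hxs
              rcases hx with hx | hx | hx
              · by_cases hxi : x = i
                · subst hxi
                  refine ⟨hi, fun j hj => ?_⟩
                  rcases hj with ⟨he2, rfl⟩ | ⟨he3, rfl⟩ <;> simp
                · have hxr : x ∉ i :: rest := by simp [hxi, hxs.2.2]
                  obtain ⟨hn, hsucc⟩ := hcl x hx hxr
                  exact ⟨hn, fun j hj => by simp [hsucc j hj]⟩
              · exact absurd hx hxs.2.1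
              · exact absurd hx hxs.1
          · -- only the pair push
            rw [if_neg h3]
            have hlen : (seen ++ [i + 2]).length ≤ nums.length + 1 :=
              nodup_bounded_length nums.length _ (nodup_snoc _ _ hnd h2.2)
                (le_snoc _ _ _ hle (edge2_le _ _ h2.1))
            rw [IH (seen ++ [i + 2]) ((i + 2) :: rest)
                (nodup_snoc _ _ hnd h2.2) (le_snoc _ _ _ hle (edge2_le _ _ h2.1))
                (by simp only [List.length_append, List.length_cons] at *; omega) ?_ ?_]
            · constructor
              · rintro ⟨x, hx, hr⟩
                simp only [List.mem_append, List.mem_cons, List.not_mem_nil, or_false] at hx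
                rcases hx with hx | hx
                · exact ⟨x, hx, hr⟩
                · subst hx
                  exact ⟨i, hsub i (by simp), ReachTo.step i (i + 2) (Or.inl ⟨h2.1, rfl⟩) hr⟩
              · rintro ⟨x, hx, hr⟩
                exact ⟨x, by simp [hx], hr⟩
            · intro x hx
              simp only [List.mem_cons] at hx
              rcases hx with hx | hx
              · subst hx; simp
              · have := hsub x (by simp [hx]); simp [this]
            · intro x hx hxs
              simp only [List.mem_append, List.mem_cons, List.not_mem_nil, or_false] at hx
              simp only [List.mem_cons, not_or] at hxs
              rcases hx with hx | hx
              · by_cases hxi : x = i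
                · subst hxi
                  refine ⟨hi, fun j hj => ?_⟩
                  rcases hj with ⟨he2, rfl⟩ | ⟨he3, rfl⟩
                  · simp
                  · by_cases hee : edge3 nums x = true
                    · have hmem : (x + 3) ∈ seen ++ [x + 2] := by
                        by_contra hno
                        exact h3 ⟨hee, hno⟩
                      simpa using hmem
                    · exact absurd he3 hee
                · have hxr : x ∉ i :: rest := by simp [hxi, hxs.2]
                  obtain ⟨hn, hsucc⟩ := hcl x hx hxr
                  exact ⟨hn, fun j hj => by simp [hsucc j hj]⟩
              · exact absurd hx hxs.1
        · rw [if_neg h2]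
          by_cases h3 : edge3 nums i = true ∧ (i + 3) ∉ seen
          · -- only the triple push
            rw [if_pos h3]
            have hlen : (seen ++ [i + 3]).length ≤ nums.length + 1 :=
              nodup_bounded_length nums.length _ (nodup_snoc _ _ hnd h3.2)
                (le_snoc _ _ _ hle (edge3_le _ _ h3.1))
            rw [IH (seen ++ [i + 3]) ((i + 3) :: rest)
                (nodup_snoc _ _ hnd h3.2) (le_snoc _ _ _ hle (edge3_le _ _ h3.1))
                (by simp only [List.length_append, List.length_cons] at *; omega) ?_ ?_]
            · constructor
              · rintro ⟨x, hx, hr⟩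
                simp only [List.mem_append, List.mem_cons, List.not_mem_nil, or_false] at hx
                rcases hx with hx | hx
                · exact ⟨x, hx, hr⟩
                · subst hx
                  exact ⟨i, hsub i (by simp), ReachTo.step i (i + 3) (Or.inr ⟨h3.1, rfl⟩) hr⟩
              · rintro ⟨x, hx, hr⟩
                exact ⟨x, by simp [hx], hr⟩
            · intro x hx
              simp only [List.mem_cons] at hx
              rcases hx with hx | hx
              · subst hx; simp
              · have := hsub x (by simp [hx]); simp [this]
            · intro x hx hxs
              simp only [List.mem_append, List.mem_cons, List.not_mem_nil, or_false] at hx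
              simp only [List.mem_cons, not_or] at hxs
              rcases hx with hx | hx
              · by_cases hxi : x = i
                · subst hxi
                  refine ⟨hi, fun j hj => ?_⟩
                  rcases hj with ⟨he2, rfl⟩ | ⟨he3, rfl⟩
                  · rcases not_and_or.mp h2 with he | he
                    · exact absurd he2 he
                    · rw [not_not] at he; simp [he]
                  · simp
                · have hxr : x ∉ i :: rest := by simp [hxi, hxs.2]
                  obtain ⟨hn, hsucc⟩ := hcl x hx hxr
                  exact ⟨hn, fun j hj => by simp [hsucc j hj]⟩
              · exact absurd hx hxs.1
          · -- no push
            rw [if_neg h3]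
            rw [IH seen rest hnd hle
                (by simp only [List.length_cons] at hm; omega) ?_ ?_]
            · intro x hx; exact hsub x (by simp [hx])
            · intro x hx hxs
              by_cases hxi : x = i
              · subst hxi
                refine ⟨hi, fun j hj => ?_⟩
                rcases hj with ⟨he2, rfl⟩ | ⟨he3, rfl⟩
                · rcases not_and_or.mp h2 with he | he
                  · exact absurd he2 he
                  · rwa [not_not] at he
                · rcases not_and_or.mp h3 with he | he
                  · exact absurd he3 he
                  · rwa [not_not] at he
              · have hxr : x ∉ i :: rest := by simp [hxi, hxs]
                exact hcl x hx hxr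

theorem validPartition_alt_iff (nums : List Int) :
    validPartition_alt nums = true ↔ CanPart nums := by
  unfold validPartition_alt
  rw [dfsLoop_iff nums (2 * nums.length + 1) [0] [0] (by simp) (by simp)
      (by simp) (by simp)
      (by intro x hx hxs; simp only [List.mem_cons, List.not_mem_nil, or_false] at hx hxs; exact absurd hx hxs)]
  have h0 : ReachTo nums 0 ↔ sufB nums 0 = true :=
    reachTo_iff_sufB nums nums.length 0 rfl (Nat.zero_le _)
  have hs : sufB nums 0 = true ↔ CanPart nums := by
    have := sufB_iff nums nums.length 0 rfl (Nat.zero_le _)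
    simpa using this
  simp [h0, hs]

-- ===== VERDICT (by name: the statement is the Claim_ definition above) =====
theorem validPartition_spec : Claim_equal_validPartition := by
  intro nums _
  unfold Spec_validPartition
  have hA := validPartition_iff nums
  have hB := validPartition_alt_iff nums
  cases hA' : validPartition nums <;> cases hB' : validPartition_alt nums <;> simp_all
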